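-- pv_equiv track=rewrite | github.com/woodyko3234/InterviewBit-Practices | Strings/Programming/Amazing_Subarrays.py | solve
-- ===== SOURCE A (Python) =====
-- def solve(A):
--     target = A.lower()
--     vowel = ['a','e','i','o','u']
--     amazing_num, l = 0, len(A)
--     for idx, i in enumerate(target):
--         if i in vowel:
--             amazing_num += (l - idx)
--     return amazing_num % 10003
-- ===== SOURCE B (Python) =====
-- def solve(A):
--     # The answer equals the sum over all positions j of the number of vowels
--     # in the prefix A[:j+1]: each vowel at index i is counted once for every
--     # j >= i, i.e. (len(A) - i) times in total.
--     total = 0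
--     seen = 0
--     for ch in A.lower():
--         if ch in 'aeiou':
--             seen += 1
--         total += seen
--     return total % 10003
-- ===== Notes on version B (the rewrite author's own statement) =====
-- stated objective: alternative
-- what changed: Instead of adding (len - idx) at each vowel, B adds at EVERY position the running count of vowels seen so far (prefix-count summation); enumerate, len and the subtraction disappear.
import Mathlib
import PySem

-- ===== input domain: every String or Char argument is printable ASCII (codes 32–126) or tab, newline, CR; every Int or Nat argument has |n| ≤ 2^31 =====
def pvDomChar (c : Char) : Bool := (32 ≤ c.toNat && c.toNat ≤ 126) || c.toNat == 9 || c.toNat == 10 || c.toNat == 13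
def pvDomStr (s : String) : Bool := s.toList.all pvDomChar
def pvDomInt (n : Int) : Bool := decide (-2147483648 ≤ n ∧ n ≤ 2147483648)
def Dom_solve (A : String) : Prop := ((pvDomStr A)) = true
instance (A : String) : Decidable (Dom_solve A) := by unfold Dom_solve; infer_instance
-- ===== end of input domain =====

-- B replaces A's per-vowel (len - idx) arithmetic by summing, at every position, the running prefix count of vowels seen so far; alternative decomposition, same cost.

-- ===== PORT A =====
def solve (A : String) : Int :=
  let target := PySem.Str.lower A
  let vowel : List Char := ['a','e','i','o','u']
  let amazing_num : Int := 0
  let l : Int := PySem.Str.len A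
  let amazing_num :=
    (PySem.List.enumerate target.toList 0).foldl
      (fun acc p => if p.2 ∈ vowel then acc + (l - p.1) else acc) amazing_num
  PySem.Int.mod amazing_num 10003

-- ===== PORT B =====
def solve_alt (A : String) : Int :=
  let res : Int × Int :=
    (PySem.Str.lower A).toList.foldl
      (fun (st : Int × Int) ch =>
        let seen := if ch ∈ ('a' :: 'e' :: 'i' :: 'o' :: 'u' :: []) then st.2 + 1 else st.2
        (st.1 + seen, seen))
      (0, 0)
  PySem.Int.mod res.1 10003

-- ===== PRECONDITION & SPEC =====
def Spec_solve (A : String) (out : Int) : Prop := out = solve_alt A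
instance (A : String) (out : Int) : Decidable (Spec_solve A out) := by unfold Spec_solve; infer_instance

-- ===== CLAIM (what is proved, stated in full; the proofs are below) =====
def Claim_equal_solve : Prop := ∀ (A : String), Dom_solve A → Spec_solve A (solve A)

-- ===== LEMMAS AND PROOFS =====

/-- Σ over cs where a vowel at the head contributes m, at the next position m-1, … -/
def pvCnt (cs : List Char) (m : Int) : Int :=
  match cs with
  | [] => 0
  | c :: t => (if c ∈ (['a','e','i','o','u'] : List Char) then m else 0) + pvCnt t (m - 1)

/-- number of vowels in cs, as an Int -/
def pvVc (cs : List Char) : Int :=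
  match cs with
  | [] => 0
  | c :: t => (if c ∈ (['a','e','i','o','u'] : List Char) then 1 else 0) + pvVc t

theorem pvFoldA (cs : List Char) : ∀ (acc s l : Int),
    (PySem.List.enumerate cs s).foldl
      (fun acc p => if p.2 ∈ (['a','e','i','o','u'] : List Char) then acc + (l - p.1) else acc) acc
    = acc + pvCnt cs (l - s) := by
  induction cs with
  | nil => intro acc s l; simp [PySem.List.enumerate_nil, pvCnt]
  | cons c t ih =>
    intro acc s l
    rw [PySem.List.enumerate_cons, List.foldl_cons, ih]
    simp only [pvCnt]
    have h1 : l - (s + 1) = l - s - 1 := by ring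
    rw [h1]
    split_ifs <;> ring

theorem pvFoldB (cs : List Char) : ∀ (t s : Int),
    cs.foldl
      (fun (st : Int × Int) ch =>
        let seen := if ch ∈ ('a' :: 'e' :: 'i' :: 'o' :: 'u' :: []) then st.2 + 1 else st.2
        (st.1 + seen, seen))
      (t, s)
    = (t + s * cs.length + pvCnt cs cs.length, s + pvVc cs) := by
  induction cs with
  | nil => intro t s; simp [pvCnt, pvVc]
  | cons c tl ih =>
    intro t s
    rw [List.foldl_cons]
    simp only
    rw [ih]
    simp only [pvCnt, pvVc, List.length_cons]
    push_cast
    have h1 : ((tl.length : Int) + 1) - 1 = tl.length := by ring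
    rw [h1]
    split_ifs <;> simp only [Prod.mk.injEq] <;> constructor <;> ring

theorem pvLowerLen (A : String) :
    (PySem.Str.lower A).toList.length = A.toList.length := by
  simp [PySem.Str.toList_lower, PySem.Chars.lower]

-- ===== VERDICT (by name: the statement is the Claim_ definition above) =====
theorem solve_spec : Claim_equal_solve := by
  intro A _
  unfold Spec_solve solve solve_alt
  simp only [pvFoldA, pvFoldB, PySem.Str.len]
  rw [pvLowerLen]
  norm_num
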